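-- pv_equiv track=rewrite | github.com/NouranElshazly/Python_ITI | DAY3/lab_problem2.py | difference_of_largest_and_smallest
-- ===== SOURCE A (Python) =====
-- def difference_of_largest_and_smallest(num):
--     digits = []
--     while num > 0:
--         digits.append(num % 10)
--         num //= 10
--     digits.sort()
--     smallest_num = 0
--     for i in digits:
--         smallest_num = smallest_num * 10 + i
--     digits.sort(reverse=True)
--     largest_num = 0
--     for i in digits:
--         largest_num = largest_num * 10 + i
--     return largest_num - smallest_num
-- ===== SOURCE B (Python) =====
-- def difference_of_largest_and_smallest(num):
--     counts = {}
--     while num > 0: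
--         d = num % 10
--         counts[d] = counts.get(d, 0) + 1
--         num //= 10
--     smallest = 0
--     for d in range(10):
--         for _ in range(counts.get(d, 0)):
--             smallest = smallest * 10 + d
--     largest = 0
--     for d in range(9, -1, -1):
--         for _ in range(counts.get(d, 0)):
--             largest = largest * 10 + d
--     return largest - smallest
-- ===== Notes on version B (the rewrite author's own statement) =====
-- stated objective: alternative
-- what changed: Replaces the two comparison sorts of the digit list by a counting sort: one digit-extraction loop fills a digit->count map, and the smallest/largest numbers are built by sweeping the fixed digit alphabet 0..9 upward and downward, appending each digit count-many times.
import Mathlib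
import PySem

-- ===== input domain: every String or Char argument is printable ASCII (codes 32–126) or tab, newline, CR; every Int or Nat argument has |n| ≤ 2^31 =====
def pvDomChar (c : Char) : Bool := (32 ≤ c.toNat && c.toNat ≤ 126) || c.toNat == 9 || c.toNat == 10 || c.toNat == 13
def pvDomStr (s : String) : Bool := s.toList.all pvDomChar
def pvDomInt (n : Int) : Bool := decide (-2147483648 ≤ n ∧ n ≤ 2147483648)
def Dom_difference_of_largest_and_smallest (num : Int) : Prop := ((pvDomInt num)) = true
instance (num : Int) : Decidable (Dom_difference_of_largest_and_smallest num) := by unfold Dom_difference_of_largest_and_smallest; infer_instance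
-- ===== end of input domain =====

-- B replaces A's two comparison sorts of the digit list by a counting sort over the
-- fixed digit alphabet 0..9 (a digit-count map filled by the extraction loop, then an
-- upward and a downward sweep over 0..9); same return value for every int, proved below.

-- ===== PORT A =====
-- the while loop: digits.append(num % 10); num //= 10
def pvDigitsA (num : Int) (digits : List Int) : List Int :=
  if 0 < num then
    pvDigitsA (PySem.Int.floordiv num 10) (digits ++ [PySem.Int.mod num 10])
  else digits
termination_by num.toNat
decreasing_by
  rw [PySem.Int.floordiv_eq_ediv_of_pos (by norm_num)]
  omega

def difference_of_largest_and_smallest (num : Int) : Int :=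
  let digits := pvDigitsA num []
  let digits1 := PySem.List.sorted digits (fun x => x)
  let smallest_num := digits1.foldl (fun s i => s * 10 + i) 0
  let digits2 := PySem.List.sorted digits1 (fun x => x) true
  let largest_num := digits2.foldl (fun l i => l * 10 + i) 0
  largest_num - smallest_num

-- ===== PORT B =====
-- the while loop: counts[d] = counts.get(d, 0) + 1; num //= 10
def pvCountsB (num : Int) (counts : PySem.Dict Int Int) : PySem.Dict Int Int :=
  if 0 < num then
    pvCountsB (PySem.Int.floordiv num 10)
      (counts.insert (PySem.Int.mod num 10)
        (counts.getD (PySem.Int.mod num 10) 0 + 1))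
  else counts
termination_by num.toNat
decreasing_by
  rw [PySem.Int.floordiv_eq_ediv_of_pos (by norm_num)]
  omega

def difference_of_largest_and_smallest_alt (num : Int) : Int :=
  let counts := pvCountsB num PySem.Dict.empty
  let smallest := (PySem.List.pyRange 0 10 1).foldl
    (fun s d => (PySem.List.pyRange 0 (counts.getD d 0) 1).foldl (fun s _ => s * 10 + d) s) 0
  let largest := (PySem.List.pyRange 9 (-1) (-1)).foldl
    (fun l d => (PySem.List.pyRange 0 (counts.getD d 0) 1).foldl (fun l _ => l * 10 + d) l) 0
  largest - smallest

-- ===== PRECONDITION & SPEC =====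
def Spec_difference_of_largest_and_smallest (num : Int) (out : Int) : Prop := out = difference_of_largest_and_smallest_alt num
instance (num : Int) (out : Int) : Decidable (Spec_difference_of_largest_and_smallest num out) := by unfold Spec_difference_of_largest_and_smallest; infer_instance

-- ===== CLAIM (what is proved, stated in full; the proofs are below) =====
def Claim_equal_difference_of_largest_and_smallest : Prop := ∀ (num : Int), Dom_difference_of_largest_and_smallest num → Spec_difference_of_largest_and_smallest num (difference_of_largest_and_smallest num)

-- ===== LEMMAS AND PROOFS =====

theorem pvDigitsA_neg (num : Int) (h : ¬ 0 < num) (acc : List Int) : pvDigitsA num acc = acc := by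
  rw [pvDigitsA]; simp [h]

theorem pvDigitsA_acc (n : Nat) : ∀ (num : Int), num.toNat = n →
    ∀ acc, pvDigitsA num acc = acc ++ pvDigitsA num [] := by
  induction n using Nat.strong_induction_on with
  | _ n ih =>
    intro num hn acc
    by_cases h : 0 < num
    · have hlt : (PySem.Int.floordiv num 10).toNat < n := by
        rw [PySem.Int.floordiv_eq_ediv_of_pos (by norm_num)]; omega
      conv_lhs => rw [pvDigitsA]
      conv_rhs => rw [pvDigitsA]
      simp only [if_pos h]
      rw [ih _ hlt _ rfl (acc ++ [PySem.Int.mod num 10]),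
          ih _ hlt _ rfl ([] ++ [PySem.Int.mod num 10])]
      simp
    · rw [pvDigitsA_neg _ h, pvDigitsA_neg _ h]; simp

theorem pvDigitsA_pos (num : Int) (h : 0 < num) :
    pvDigitsA num [] = PySem.Int.mod num 10 :: pvDigitsA (PySem.Int.floordiv num 10) [] := by
  conv_lhs => rw [pvDigitsA]
  simp only [if_pos h]
  rw [pvDigitsA_acc _ _ rfl]
  simp

theorem pvDigitsA_bound (n : Nat) : ∀ (num : Int), num.toNat = n →
    ∀ x ∈ pvDigitsA num [], 0 ≤ x ∧ x < 10 := by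
  induction n using Nat.strong_induction_on with
  | _ n ih =>
    intro num hn x hx
    by_cases h : 0 < num
    · rw [pvDigitsA_pos num h] at hx
      rcases hx with _ | ⟨_, hx⟩
      · exact ⟨PySem.Int.mod_nonneg num (by norm_num), PySem.Int.mod_lt num (by norm_num)⟩
      · have hlt : (PySem.Int.floordiv num 10).toNat < n := by
          rw [PySem.Int.floordiv_eq_ediv_of_pos (by norm_num)]; omega
        exact ih _ hlt _ rfl x hx
    · rw [pvDigitsA_neg _ h] at hx; simp at hx

-- B's counter holds exactly the digit multiplicities of A's digit list
theorem pvCountsB_getD (n : Nat) : ∀ (num : Int), num.toNat = n →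
    ∀ (c : PySem.Dict Int Int) (d : Int),
      (pvCountsB num c).getD d 0 = c.getD d 0 + ((pvDigitsA num []).count d : Int) := by
  induction n using Nat.strong_induction_on with
  | _ n ih =>
    intro num hn c d
    by_cases h : 0 < num
    · have hlt : (PySem.Int.floordiv num 10).toNat < n := by
        rw [PySem.Int.floordiv_eq_ediv_of_pos (by norm_num)]; omega
      rw [pvCountsB, if_pos h, ih _ hlt _ rfl, pvDigitsA_pos num h,
          PySem.Dict.getD_insert, List.count_cons]
      by_cases he : d = PySem.Int.mod num 10
      · subst he
        rw [if_pos rfl, if_pos (by simp only [beq_self_eq_true])]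
        push_cast; ring
      · rw [if_neg he, if_neg (by simp only [beq_iff_eq]; exact fun hh => he hh.symm)]
        simp
    · rw [pvCountsB, if_neg h, pvDigitsA_neg _ h]
      simp

-- canonical bucket expansion: digit d repeated (multiplicity of d in l) times, d = 0 .. n-1
def pvCanon (n : Nat) (l : List Int) : List Int :=
  ((List.range n).map (fun d => (d : Int))).flatMap (fun d => List.replicate (l.count d) d)

theorem pvCanon_succ (n : Nat) (l : List Int) :
    pvCanon (n + 1) l = pvCanon n l ++ List.replicate (l.count (n : Int)) (n : Int) := by
  simp [pvCanon, List.range_succ]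

theorem pvCanon_count (n : Nat) (l : List Int) (a : Int) :
    (pvCanon n l).count a = if 0 ≤ a ∧ a < (n : Int) then l.count a else 0 := by
  induction n with
  | zero => simp [pvCanon]
  | succ n ih =>
    rw [pvCanon_succ, List.count_append, ih, List.count_replicate]
    by_cases ha : a = (n : Int)
    · subst ha
      rw [if_neg (by omega), if_pos (beq_self_eq_true _), if_pos (by push_cast; omega)]
      simp
    · rw [if_neg (fun hh => ha (eq_of_beq hh).symm)]
      by_cases hr : 0 ≤ a ∧ a < (n : Int)
      · rw [if_pos hr, if_pos ⟨hr.1, by push_cast; omega⟩]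
        omega
      · rw [if_neg hr, if_neg (by intro hc; apply hr; refine ⟨hc.1, ?_⟩; push_cast at hc ⊢; omega)]

theorem pvCanon_mem (n : Nat) (l : List Int) (x : Int) (hx : x ∈ pvCanon n l) :
    0 ≤ x ∧ x < (n : Int) := by
  have hc := pvCanon_count n l x
  have hx' : (pvCanon n l).count x ≠ 0 := by
    simpa [List.count_eq_zero] using hx
  by_contra hcon
  rw [if_neg hcon] at hc
  exact hx' hc

theorem pvCanon_pairwise (n : Nat) (l : List Int) :
    (pvCanon n l).Pairwise (· ≤ ·) := by
  induction n with
  | zero => simp [pvCanon]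
  | succ n ih =>
    rw [pvCanon_succ, List.pairwise_append]
    refine ⟨ih, List.pairwise_replicate.mpr (Or.inr le_rfl), ?_⟩
    intro a ha b hb
    rw [List.eq_of_mem_replicate hb]
    have := pvCanon_mem n l a ha
    omega

theorem pvCanon_perm (l : List Int) (h : ∀ x ∈ l, 0 ≤ x ∧ x < 10) :
    (pvCanon 10 l).Perm l := by
  rw [List.perm_iff_count]
  intro a
  rw [pvCanon_count]
  by_cases hr : 0 ≤ a ∧ a < (10 : Int)
  · rw [if_pos (by exact_mod_cast hr)]
  · rw [if_neg (by exact_mod_cast hr)]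
    symm
    rw [List.count_eq_zero]
    exact fun hm => hr (h a hm)

-- A's ascending sort is exactly the upward bucket expansion
theorem sorted_asc_eq (l : List Int) (h : ∀ x ∈ l, 0 ≤ x ∧ x < 10) :
    PySem.List.sorted l (fun x => x) = pvCanon 10 l :=
  PySem.List.sorted_id_eq_of_perm_of_pairwise l (pvCanon 10 l) (pvCanon_perm l h) (pvCanon_pairwise 10 l)

-- A's descending sort is exactly the downward bucket expansion
theorem sorted_desc_eq (xs l : List Int) (hp : xs.Perm l) (h : ∀ x ∈ l, 0 ≤ x ∧ x < 10) :
    PySem.List.sorted xs (fun x => x) true = (pvCanon 10 l).reverse := by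
  refine List.Perm.eq_of_pairwise (le := fun a b => b ≤ a)
    (fun a b _ _ h1 h2 => le_antisymm h2 h1) ?_ ?_ ?_
  · exact PySem.List.sorted_pairwise_rev xs (fun x => x)
  · exact List.pairwise_reverse.mpr (pvCanon_pairwise 10 l)
  · exact ((PySem.List.sorted_perm xs (fun x => x) true).trans hp).trans
      ((pvCanon_perm l h).symm.trans (pvCanon 10 l).reverse_perm.symm)

theorem foldl_const {α : Type} (F : Int → Int) :
    ∀ (l : List α) (a : Int), l.foldl (fun s _ => F s) a = F^[l.length] a := by
  intro l
  induction l with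
  | nil => intro a; rfl
  | cons x t ih =>
    intro a
    rw [List.foldl_cons, ih, List.length_cons, Function.iterate_succ_apply]

theorem repl_fold_eq_range (d : Int) (k : Nat) (a : Int) :
    (List.replicate k d).foldl (fun s i => s * 10 + i) a
    = (PySem.List.pyRange 0 (k : Int) 1).foldl (fun s _ => s * 10 + d) a := by
  rw [PySem.List.foldl_congr_mem _ _ (fun s (_ : Int) => s * 10 + d) a
      (fun acc x hx => by rw [List.eq_of_mem_replicate hx]),
      foldl_const, foldl_const, List.length_replicate, PySem.List.pyRange_zero_natCast,
      List.length_map, List.length_range]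

-- folding the bucket expansion of ds = B's nested range(count) loops over ds
theorem build_eq (digits : List Int) (c : PySem.Dict Int Int)
    (hc : ∀ d, c.getD d 0 = (digits.count d : Int)) :
    ∀ (dsI : List Int) (a : Int),
    (dsI.flatMap (fun d => List.replicate (digits.count d) d)).foldl
        (fun s i => s * 10 + i) a
    = dsI.foldl
        (fun s d => (PySem.List.pyRange 0 (c.getD d 0) 1).foldl (fun s _ => s * 10 + d) s) a := by
  intro dsI
  induction dsI with
  | nil => intro a; rfl
  | cons d t ih =>
    intro a
    rw [List.flatMap_cons, List.foldl_append, List.foldl_cons, ih, hc, repl_fold_eq_range]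

-- ===== VERDICT (by name: the statement is the Claim_ definition above) =====
theorem difference_of_largest_and_smallest_spec : Claim_equal_difference_of_largest_and_smallest := by
  intro num _
  unfold Spec_difference_of_largest_and_smallest
  unfold difference_of_largest_and_smallest difference_of_largest_and_smallest_alt
  set digits := pvDigitsA num [] with hd
  have hb : ∀ x ∈ digits, 0 ≤ x ∧ x < 10 := fun x hx => pvDigitsA_bound _ num rfl x hx
  have hc : ∀ d, (pvCountsB num PySem.Dict.empty).getD d 0 = (digits.count d : Int) := by
    intro d
    rw [pvCountsB_getD _ num rfl]
    simp [PySem.Dict.getD, PySem.Dict.get?, PySem.Dict.empty]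
    rw [← hd]
  have hasc : PySem.List.sorted digits (fun x => x) = pvCanon 10 digits := sorted_asc_eq digits hb
  have hdesc : PySem.List.sorted (PySem.List.sorted digits (fun x => x)) (fun x => x) true
      = (pvCanon 10 digits).reverse :=
    sorted_desc_eq _ _ (PySem.List.sorted_perm digits (fun x => x) false) hb
  have hds : (List.range 10).map (fun d => (d : Int)) = PySem.List.pyRange 0 10 1 := by decide
  have hds' : ((List.range 10).map (fun d => (d : Int))).reverse = PySem.List.pyRange 9 (-1) (-1) := by decide
  have hcanon : pvCanon 10 digits
      = (PySem.List.pyRange 0 10 1).flatMap (fun d => List.replicate (digits.count d) d) := by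
    rw [pvCanon, hds]
  have hcanonr : (pvCanon 10 digits).reverse
      = (PySem.List.pyRange 9 (-1) (-1)).flatMap (fun d => List.replicate (digits.count d) d) := by
    rw [pvCanon, List.reverse_flatMap, ← hds']
    simp [Function.comp_def, List.reverse_replicate]
  dsimp only
  rw [hdesc, hasc, hcanonr, hcanon,
     build_eq digits (pvCountsB num PySem.Dict.empty) hc,
     build_eq digits (pvCountsB num PySem.Dict.empty) hc]
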